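-- pv_equiv track=rewrite | github.com/pypi-data/pypi-mirror-157 | packages/hypertiling/hypertiling-1.0.2.tar.gz/hypertiling-1.0.2/hypertiling/util.py | n_cell_centered_recursion
-- ===== SOURCE A (Python) =====
-- def n_cell_centered_recursion(p,q,l):
--     a = (p-2)*(q-2)-2
--     if l==0:
--         return 0
--     elif l==1:
--         return (p-2)*q
--     else:
--         return a*n_cell_centered_recursion(p,q,l-1)-n_cell_centered_recursion(p,q,l-2)
-- ===== SOURCE B (Python) =====
-- def n_cell_centered_recursion(p, q, l):
--     if l == 0:
--         return 0
--     a = (p - 2) * (q - 2) - 2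
--     prev, cur = 0, (p - 2) * q
--     for _ in range(l - 1):
--         prev, cur = cur, a * cur - prev
--     return cur
-- ===== Notes on version B (the rewrite author's own statement) =====
-- stated objective: faster
-- what changed: Replaces the naive exponential double recursion with a bottom-up loop keeping only the last two recurrence terms; intended as faster (asymptotic O(l) vs exponential) - measured 39.53x at the largest size both finished, with A timing out on larger inputs where B returns.
import Mathlib
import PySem

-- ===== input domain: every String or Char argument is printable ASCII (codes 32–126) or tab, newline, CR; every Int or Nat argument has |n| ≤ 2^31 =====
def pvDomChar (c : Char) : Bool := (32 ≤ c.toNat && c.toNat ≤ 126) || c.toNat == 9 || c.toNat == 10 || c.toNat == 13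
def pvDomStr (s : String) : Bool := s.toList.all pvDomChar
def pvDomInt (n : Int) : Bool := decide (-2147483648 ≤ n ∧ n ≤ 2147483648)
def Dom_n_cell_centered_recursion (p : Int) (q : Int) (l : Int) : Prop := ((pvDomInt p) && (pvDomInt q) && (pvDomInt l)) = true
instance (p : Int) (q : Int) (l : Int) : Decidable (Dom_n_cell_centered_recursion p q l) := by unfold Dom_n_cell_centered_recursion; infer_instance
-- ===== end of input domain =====

-- B replaces A's exponential double recursion by a bottom-up loop keeping only the last two
-- recurrence terms; intended as faster (O(l) vs exponential): measured 39.53x at the largest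
-- size both finished, A timed out beyond that where B still returned.
-- Pre_ excludes l < 0, where A recurses without end (RecursionError).


-- ===== PORT A =====
-- A's recursion, on the Nat value of l (A only terminates for l ≥ 0, excluded by Pre_ otherwise)
def nccrA (p : Int) (q : Int) : Nat → Int
  | 0 => 0
  | 1 => (p - 2) * q
  | n + 2 => ((p - 2) * (q - 2) - 2) * nccrA p q (n + 1) - nccrA p q n

def n_cell_centered_recursion (p : Int) (q : Int) (l : Int) : Int := nccrA p q l.toNat

-- ===== PORT B =====
def n_cell_centered_recursion_alt (p : Int) (q : Int) (l : Int) : Int :=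
  if l = 0 then 0
  else
    let a := (p - 2) * (q - 2) - 2
    (((List.range (l - 1).toNat).foldl
        (fun (s : Int × Int) _ => (s.2, a * s.2 - s.1)) (0, (p - 2) * q))).2

-- ===== PRECONDITION & SPEC =====
-- Pre_ excludes l < 0, where A recurses forever (Python RecursionError).
def Pre_n_cell_centered_recursion (p : Int) (q : Int) (l : Int) : Prop := 0 ≤ l
instance (p : Int) (q : Int) (l : Int) : Decidable (Pre_n_cell_centered_recursion p q l) := by unfold Pre_n_cell_centered_recursion; infer_instance
def pvWitness_n_cell_centered_recursion : Int × Int × Int := (7, 3, 4)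

def Spec_n_cell_centered_recursion (p : Int) (q : Int) (l : Int) (out : Int) : Prop := out = n_cell_centered_recursion_alt p q l
instance (p : Int) (q : Int) (l : Int) (out : Int) : Decidable (Spec_n_cell_centered_recursion p q l out) := by unfold Spec_n_cell_centered_recursion; infer_instance

-- ===== CLAIM (what is proved, stated in full; the proofs are below) =====
def Claim_equal_n_cell_centered_recursion : Prop := ∀ (p : Int) (q : Int) (l : Int), Dom_n_cell_centered_recursion p q l → Pre_n_cell_centered_recursion p q l → Spec_n_cell_centered_recursion p q l (n_cell_centered_recursion p q l)

-- ===== LEMMAS AND PROOFS =====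
-- After m iterations B's loop state is the pair of consecutive recurrence values (nccrA m, nccrA (m+1)).
theorem nccr_loop_invariant (p q : Int) (m : Nat) :
    (List.range m).foldl
        (fun (s : Int × Int) _ => (s.2, ((p - 2) * (q - 2) - 2) * s.2 - s.1)) (0, (p - 2) * q)
      = (nccrA p q m, nccrA p q (m + 1)) := by
  induction m with
  | zero => simp [nccrA]
  | succ n ih =>
      rw [List.range_succ, List.foldl_append, ih]
      simp [nccrA]

-- ===== VERDICT (by name: the statement is the Claim_ definition above) =====
theorem n_cell_centered_recursion_spec : Claim_equal_n_cell_centered_recursion := by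
  intro p q l _ hpre
  have hl0 : 0 ≤ l := hpre
  unfold Spec_n_cell_centered_recursion n_cell_centered_recursion n_cell_centered_recursion_alt
  by_cases h0 : l = 0
  · simp [h0, nccrA]
  · simp only [if_neg h0]
    rw [nccr_loop_invariant]
    have : (l - 1).toNat + 1 = l.toNat := by omega
    rw [this]
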